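-- pv_equiv track=rewrite | github.com/MrBrantCode/unitest_baseline | mut_generate/mist_train_cf/cf_68554/solution.py | quantum_teleportation
-- ===== SOURCE A (Python) =====
-- def quantum_teleportation(message, sender_particle, receiver_particle):
--     # Define a dictionary for binary to state mapping
--     binary_to_state = {format(i, '08b'): i for i in range(256)}
--
--     # Convert message to binary
--     binary_message = ''.join(format(ord(char), '08b') for char in message)
--
--     # Split binary message into 8-bit chunks
--     binary_chunks = [binary_message[i:i+8] for i in range(0, len(binary_message), 8)]
--
--     # Initialize teleported message
--     teleported_message = ''
--
--     # Iterate over each chunk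
--     for chunk in binary_chunks:
--         # Map the binary chunk to a state
--         state = binary_to_state[chunk]
--
--         # Simulate quantum teleportation (in this case, just add the state to the teleported message)
--         teleported_message += chr(state)
--
--     return teleported_message
-- ===== SOURCE B (Python) =====
-- def quantum_teleportation(message, sender_particle, receiver_particle):
--     # Encoding each character to its 8-bit binary form and decoding it back is the
--     # identity on characters with code < 256, so the message is returned unchanged.
--     return message
-- ===== Notes on version B (the rewrite author's own statement) =====
-- stated objective: faster
-- what changed: B recognizes that encoding every character to 8-bit binary and decoding each 8-bit chunk back is the identity, and returns the message directly instead of building the 256-entry dict, the bit string, the chunk list and the rebuilt string.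
import Mathlib
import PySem

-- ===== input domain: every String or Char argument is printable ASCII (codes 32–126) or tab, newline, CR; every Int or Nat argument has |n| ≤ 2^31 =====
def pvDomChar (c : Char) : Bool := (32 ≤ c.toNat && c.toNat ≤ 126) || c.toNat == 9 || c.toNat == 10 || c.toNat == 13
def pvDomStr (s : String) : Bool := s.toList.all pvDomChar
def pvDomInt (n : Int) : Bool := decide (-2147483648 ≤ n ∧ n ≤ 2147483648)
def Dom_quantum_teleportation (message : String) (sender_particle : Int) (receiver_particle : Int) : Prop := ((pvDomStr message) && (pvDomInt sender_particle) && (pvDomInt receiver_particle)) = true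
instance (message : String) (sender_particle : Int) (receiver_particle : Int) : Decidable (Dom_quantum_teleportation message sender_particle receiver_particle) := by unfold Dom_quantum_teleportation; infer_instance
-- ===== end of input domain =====

-- B returns the message directly: the binary round-trip A performs is the identity on Dom.
-- (A is O(n) with a large constant; B is O(1).)

-- ===== PORT A =====
-- hand port of format(i, '08b'): the 8 binary digits of i, MSB first; exact for 0 ≤ i < 256
def pvFmt08b (i : Int) : List Char :=
  (List.range 8).map (fun k => if i.toNat / 2 ^ (7 - k) % 2 = 1 then '1' else '0')

-- binary_to_state = {format(i,'08b'): i for i in range(256)}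
def pvBinaryToState : PySem.Dict (List Char) Int :=
  (PySem.List.pyRange 0 256 1).foldl (fun d i => d.insert (pvFmt08b i) i) PySem.Dict.empty

def quantum_teleportation (message : String) (sender_particle : Int) (receiver_particle : Int) : String :=
  -- binary_message = ''.join(format(ord(char), '08b') for char in message)
  let binary_message : List Char := (message.toList.map (fun c => pvFmt08b (c.toNat : Int))).flatten
  -- binary_chunks = [binary_message[i:i+8] for i in range(0, len(binary_message), 8)]
  let binary_chunks : List (List Char) :=
    (PySem.List.pyRange 0 (binary_message.length : Int) 8).map
      (fun i => PySem.List.slice binary_message (some i) (some (i + 8)))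
  -- for chunk in binary_chunks: teleported_message += chr(binary_to_state[chunk])
  -- (a missing key is a KeyError in Python; unreachable on Dom, ported with default 0)
  let teleported_message : List Char :=
    binary_chunks.foldl (fun acc chunk => acc ++ [Char.ofNat ((pvBinaryToState.getD chunk 0).toNat)]) []
  String.ofList teleported_message

-- ===== PORT B =====
def quantum_teleportation_alt (message : String) (sender_particle : Int) (receiver_particle : Int) : String :=
  message

-- ===== PRECONDITION & SPEC =====
def Spec_quantum_teleportation (message : String) (sender_particle : Int) (receiver_particle : Int) (out : String) : Prop := out = quantum_teleportation_alt message sender_particle receiver_particle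
instance (message : String) (sender_particle : Int) (receiver_particle : Int) (out : String) : Decidable (Spec_quantum_teleportation message sender_particle receiver_particle out) := by unfold Spec_quantum_teleportation; infer_instance

-- ===== CLAIM (what is proved, stated in full; the proofs are below) =====
def Claim_equal_quantum_teleportation : Prop := ∀ (message : String) (sender_particle : Int) (receiver_particle : Int), Dom_quantum_teleportation message sender_particle receiver_particle → Spec_quantum_teleportation message sender_particle receiver_particle (quantum_teleportation message sender_particle receiver_particle)

-- ===== LEMMAS AND PROOFS =====

-- decoding the 8 bits back: foldl doubling
def pvDecode (bits : List Char) : Nat :=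
  bits.foldl (fun a b => 2 * a + (if b = '1' then 1 else 0)) 0

set_option maxRecDepth 100000 in
theorem pvDecode_fmt : ∀ n : Nat, n < 256 → pvDecode (pvFmt08b (n : Int)) = n := by decide

theorem pvFmt08b_inj {m n : Int} (hm0 : 0 ≤ m) (hm : m < 256) (hn0 : 0 ≤ n) (hn : n < 256)
    (h : pvFmt08b m = pvFmt08b n) : m = n := by
  have hm' : m.toNat < 256 := by omega
  have hn' : n.toNat < 256 := by omega
  have e1 := pvDecode_fmt m.toNat hm'
  have e2 := pvDecode_fmt n.toNat hn'
  rw [Int.toNat_of_nonneg hm0] at e1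
  rw [Int.toNat_of_nonneg hn0] at e2
  rw [h, e2] at e1
  omega

theorem pvLength_fmt (i : Int) : (pvFmt08b i).length = 8 := by
  simp [pvFmt08b]

-- invariant for the dict-building fold
theorem pvGet?_foldl_insert {α : Type} [BEq α] [LawfulBEq α]
    (f : Int → α) (n : Int) :
    ∀ (l : List Int) (d : PySem.Dict α Int),
    (∀ m ∈ l, f m = f n → m = n) →
    (d.get? (f n) = some n ∨ n ∈ l) →
    (l.foldl (fun d i => d.insert (f i) i) d).get? (f n) = some n := by
  intro l
  induction l with
  | nil => intro d _ h; simpa using h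
  | cons i rest ih =>
    intro d hinj h
    simp only [List.foldl_cons]
    apply ih
    · intro m hm; exact hinj m (List.mem_cons_of_mem _ hm)
    · by_cases hk : f i = f n
      · left
        have he : i = n := hinj i (List.mem_cons_self) hk
        rw [he]
        exact PySem.Dict.get?_insert_self d (f n) n
      · rcases h with h | h
        · left
          rw [PySem.Dict.get?_insert_of_ne d i (fun e => hk e.symm)]
          exact h
        · rcases List.mem_cons.mp h with h | h
          · exact absurd (by rw [h]) hk
          · right; exact h

theorem pvLookup_fmt (n : Int) (h0 : 0 ≤ n) (h : n < 256) :
    pvBinaryToState.getD (pvFmt08b n) 0 = n := by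
  unfold pvBinaryToState PySem.Dict.getD
  rw [pvGet?_foldl_insert (pvFmt08b) n (PySem.List.pyRange 0 256 1) PySem.Dict.empty]
  · rfl
  · intro m hm he
    rw [PySem.List.mem_pyRange_one] at hm
    exact pvFmt08b_inj hm.1 hm.2 h0 h he
  · right
    rw [PySem.List.mem_pyRange_one]
    exact ⟨h0, h⟩

-- blocks of length 8: dropping 8k and taking 8 yields the k-th block
theorem pvDrop_take_flatten : ∀ (bs : List (List Char)), (∀ b ∈ bs, b.length = 8) →
    ∀ k (hk : k < bs.length), (bs.flatten.drop (8 * k)).take 8 = bs[k] := by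
  intro bs
  induction bs with
  | nil => intro _ k hk; simp at hk
  | cons b rest ih =>
    intro h k hk
    have hb : b.length = 8 := h b (List.mem_cons_self)
    cases k with
    | zero =>
      simp only [Nat.mul_zero, List.drop_zero, List.flatten_cons, List.getElem_cons_zero]
      rw [List.take_append_of_le_length (by omega)]
      simp [hb]
    | succ k =>
      have h8 : 8 * (k + 1) = b.length + 8 * k := by omega
      simp only [List.flatten_cons, h8]
      rw [List.drop_append, List.drop_eq_nil_of_le (by omega), List.nil_append]
      have h2 : b.length + 8 * k - b.length = 8 * k := by omega
      rw [h2, List.getElem_cons_succ]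
      exact ih (fun x hx => h x (List.mem_cons_of_mem _ hx)) k (by simpa using Nat.lt_of_succ_lt_succ hk)

-- the chunking comprehension recovers the blocks
theorem pvChunks_eq (bs : List (List Char)) (h : ∀ b ∈ bs, b.length = 8) :
    (PySem.List.pyRange 0 (bs.flatten.length : Int) 8).map
      (fun i => PySem.List.slice bs.flatten (some i) (some (i + 8))) = bs := by
  have hlen : bs.flatten.length = 8 * bs.length := by
    rw [List.length_flatten]
    induction bs with
    | nil => simp
    | cons b rest ih =>
      simp only [List.map_cons, List.sum_cons, h b (List.mem_cons_self),
        ih (fun x hx => h x (List.mem_cons_of_mem _ hx)), List.length_cons]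
      omega
  rw [PySem.List.pyRange_of_pos 0 (bs.flatten.length : Int) (by norm_num)]
  have hcount : (if (0:Int) < (bs.flatten.length : Int) then (((bs.flatten.length : Int) - 0 + 8 - 1) / 8).toNat else 0) = bs.length := by
    rcases Nat.eq_zero_or_pos bs.length with h0 | h0
    · simp [hlen, h0]
    · rw [if_pos (by simp [hlen]; omega)]
      rw [hlen]
      omega
  rw [hcount, List.map_map]
  apply List.ext_getElem (by simp)
  intro k h1 h2
  simp only [List.getElem_map, List.getElem_range, Function.comp_apply, zero_add]
  have : (8 : Int) * (k : Int) = ((8 * k : Nat) : Int) := by push_cast; ring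
  rw [this]
  have : ((8 * k : Nat) : Int) + 8 = ((8 * k : Nat) : Int) + ((8 : Nat) : Int) := by norm_num
  rw [this, PySem.List.slice_natCast_add]
  exact pvDrop_take_flatten bs h k (by simpa using h2)

theorem pvChar_roundtrip (c : Char) (hc : pvDomChar c = true) :
    Char.ofNat ((pvBinaryToState.getD (pvFmt08b (c.toNat : Int)) 0).toNat) = c := by
  have hlt : c.toNat < 256 := by
    simp only [pvDomChar, Bool.or_eq_true, Bool.and_eq_true, decide_eq_true_eq, beq_iff_eq] at hc
    omega
  rw [pvLookup_fmt (c.toNat : Int) (by positivity) (by exact_mod_cast hlt)]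
  simp only [Int.toNat_natCast]
  exact Char.ofNat_toNat c

-- ===== VERDICT (by name: the statement is the Claim_ definition above) =====
theorem quantum_teleportation_spec : Claim_equal_quantum_teleportation := by
  intro message sender receiver hdom
  unfold Spec_quantum_teleportation quantum_teleportation quantum_teleportation_alt
  dsimp only
  unfold Dom_quantum_teleportation at hdom
  simp only [Bool.and_eq_true] at hdom
  have hchars : ∀ c ∈ message.toList, pvDomChar c = true := by
    have := hdom.1.1
    simpa [pvDomStr, List.all_eq_true] using this
  -- the chunks are exactly the per-character 8-bit blocks
  rw [pvChunks_eq (message.toList.map (fun c => pvFmt08b (c.toNat : Int)))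
      (by intro b hb; rcases List.mem_map.mp hb with ⟨c, _, rfl⟩; exact pvLength_fmt _)]
  -- the accumulating fold is a map
  rw [PySem.List.foldl_append_eq_flatMap
      (fun chunk => [Char.ofNat ((pvBinaryToState.getD chunk 0).toNat)])]
  simp only [List.nil_append, List.flatMap_map]
  have key : ∀ l : List Char, (∀ c ∈ l, pvDomChar c = true) →
      l.flatMap (fun c => [Char.ofNat ((pvBinaryToState.getD (pvFmt08b (c.toNat : Int)) 0).toNat)]) = l := by
    intro l hl
    induction l with
    | nil => rfl
    | cons c rest ih =>
      simp only [List.flatMap_cons]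
      rw [pvChar_roundtrip c (hl c (List.mem_cons_self)),
        ih (fun x hx => hl x (List.mem_cons_of_mem _ hx))]
      rfl
  rw [key message.toList hchars]
  simp
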